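-- pv_equiv track=rewrite | github.com/GreenKubeCloud/GreenKube | src/greenkube/collectors/node_collector.py | _detect_cloud_provider
-- ===== SOURCE A (Python) =====
-- def _detect_cloud_provider(labels: dict) -> str:
--     """
--     Detect the cloud provider from node labels.
--
--     Args:
--         labels: Node labels dictionary
--
--     Returns:
--         str: Cloud provider name (ovh, azure, aws, gcp, or unknown)
--     """
--     # Check for OVH-specific labels
--     if any(key.startswith("k8s.ovh.net/") for key in labels.keys()):
--         return "ovh"
--
--     # Check for Azure-specific labels
--     if any(key.startswith("kubernetes.azure.com/") for key in labels.keys()):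
--         return "azure"
--
--     # Check for AWS-specific labels
--     if any(key.startswith("eks.amazonaws.com/") for key in labels.keys()):
--         return "aws"
--     if "node.kubernetes.io/instance-type" in labels and labels.get("topology.kubernetes.io/region", "").startswith(
--         ("us-", "eu-", "ap-", "ca-", "sa-")
--     ):
--         # AWS regions typically start with these prefixes
--         return "aws"
--
--     # Check for GCP-specific labels
--     if any(key.startswith("cloud.google.com/") for key in labels.keys()):
--         return "gcp"
--
--     # Check ProviderID patterns (fallback)
--     # This would require accessing node.spec.providerID, but we only have labels here
--     # So we return unknown if no cloud-specific labels are found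
--     return "unknown"
-- ===== SOURCE B (Python) =====
-- _PREFIX_RULES = [
--     ("k8s.ovh.net/", "ovh"),
--     ("kubernetes.azure.com/", "azure"),
--     ("eks.amazonaws.com/", "aws"),
--     ("cloud.google.com/", "gcp"),
-- ]
--
-- _AWS_REGION_PREFIXES = ("us-", "eu-", "ap-", "ca-", "sa-")
--
--
-- def _detect_cloud_provider(labels: dict) -> str:
--     found = set()
--     has_instance_type = False
--     region = None
--     for key in labels.keys():
--         for prefix, provider in _PREFIX_RULES:
--             if key.startswith(prefix):
--                 found.add(provider)
--         if key == "node.kubernetes.io/instance-type":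
--             has_instance_type = True
--         if key == "topology.kubernetes.io/region" and region is None:
--             region = labels[key]
--     if has_instance_type and (region or "").startswith(_AWS_REGION_PREFIXES):
--         found.add("aws")
--     for provider in ("ovh", "azure", "aws", "gcp"):
--         if provider in found:
--             return provider
--     return "unknown"
-- ===== Notes on version B (the rewrite author's own statement) =====
-- stated objective: alternative
-- what changed: A's five separate early-return scans over the keys are replaced by a single pass that records, against a (prefix, provider) rule table, which providers matched plus the instance-type/region evidence, and then applies the fixed precedence ovh > azure > aws > gcp.
import Mathlib
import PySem

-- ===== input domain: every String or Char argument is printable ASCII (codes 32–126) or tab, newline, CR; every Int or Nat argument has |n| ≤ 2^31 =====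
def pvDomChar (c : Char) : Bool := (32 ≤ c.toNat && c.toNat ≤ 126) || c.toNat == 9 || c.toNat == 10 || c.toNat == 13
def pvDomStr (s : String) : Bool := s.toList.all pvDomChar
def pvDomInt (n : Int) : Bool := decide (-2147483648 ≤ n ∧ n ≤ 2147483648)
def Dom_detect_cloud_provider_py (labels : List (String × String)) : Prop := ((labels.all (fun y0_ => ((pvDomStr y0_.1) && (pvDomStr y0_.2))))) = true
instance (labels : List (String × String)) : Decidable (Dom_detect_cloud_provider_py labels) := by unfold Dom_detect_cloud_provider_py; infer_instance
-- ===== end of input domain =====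

-- B replaces A's five separate scans over the keys by one pass collecting provider
-- matches against a rule table, then applies the fixed precedence (objective: alternative decomposition).

-- ===== PORT A =====
def detect_cloud_provider_py (labels : List (String × String)) : String :=
  if (labels.map Prod.fst).any (fun key => PySem.Str.startswith key "k8s.ovh.net/") then "ovh"
  else if (labels.map Prod.fst).any (fun key => PySem.Str.startswith key "kubernetes.azure.com/") then "azure"
  else if (labels.map Prod.fst).any (fun key => PySem.Str.startswith key "eks.amazonaws.com/") then "aws"
  else if (labels.map Prod.fst).contains "node.kubernetes.io/instance-type" &&
          (let r := (List.lookup "topology.kubernetes.io/region" labels).getD "";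
            PySem.Str.startswith r "us-" || PySem.Str.startswith r "eu-" ||
            PySem.Str.startswith r "ap-" || PySem.Str.startswith r "ca-" ||
            PySem.Str.startswith r "sa-") then "aws"
  else if (labels.map Prod.fst).any (fun key => PySem.Str.startswith key "cloud.google.com/") then "gcp"
  else "unknown"

-- ===== PORT B =====
-- B: one pass over the labels collecting the matched providers and the AWS region
-- evidence, then the fixed precedence ovh > azure > aws > gcp (objective: alternative decomposition).
def pvRules : List (String × String) :=
  [("k8s.ovh.net/", "ovh"), ("kubernetes.azure.com/", "azure"),
   ("eks.amazonaws.com/", "aws"), ("cloud.google.com/", "gcp")]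

def pvAwsRegionPrefixes : List String := ["us-", "eu-", "ap-", "ca-", "sa-"]

-- loop body of Source B: update (found set, has_instance_type, region) with one label
def pvStep (st : PySem.Set String × Bool × Option String) (kv : String × String) :
    PySem.Set String × Bool × Option String :=
  let found := pvRules.foldl
    (fun f r => if PySem.Str.startswith kv.1 r.1 then PySem.Set.add f r.2 else f) st.1
  let hasIt := st.2.1 || (kv.1 == "node.kubernetes.io/instance-type")
  let region := if kv.1 == "topology.kubernetes.io/region" && st.2.2 == none
                then some kv.2 else st.2.2
  (found, hasIt, region)

def detect_cloud_provider_py_alt (labels : List (String × String)) : String :=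
  let st := labels.foldl pvStep (PySem.Set.empty, false, none)
  let regionS := st.2.2.getD ""
  let found := if st.2.1 && pvAwsRegionPrefixes.any (fun p => PySem.Str.startswith regionS p)
               then PySem.Set.add st.1 "aws" else st.1
  match (["ovh", "azure", "aws", "gcp"] : List String).find?
          (fun p => PySem.Set.contains found p) with
  | some p => p
  | none => "unknown"

-- ===== PRECONDITION & SPEC =====
def Spec_detect_cloud_provider_py (labels : List (String × String)) (out : String) : Prop := out = detect_cloud_provider_py_alt labels
instance (labels : List (String × String)) (out : String) : Decidable (Spec_detect_cloud_provider_py labels out) := by unfold Spec_detect_cloud_provider_py; infer_instance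

-- ===== CLAIM (what is proved, stated in full; the proofs are below) =====
def Claim_equal_detect_cloud_provider_py : Prop := ∀ (labels : List (String × String)), Dom_detect_cloud_provider_py labels → Spec_detect_cloud_provider_py labels (detect_cloud_provider_py labels)

-- ===== LEMMAS AND PROOFS =====

theorem pvContains_add (s : PySem.Set String) (x p : String) :
    PySem.Set.contains (PySem.Set.add s x) p = (PySem.Set.contains s p || p == x) := by
  by_cases h : x ∈ s
  · rw [PySem.Set.add_of_mem h]
    by_cases hp : p = x
    · subst hp; simp [h]
    · simp [hp]
  · rw [PySem.Set.add_of_not_mem h]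
    simp [PySem.Set.contains, beq_eq_decide]

-- one loop step, found-set component, against the literal rule table
theorem pvStep_found (st : PySem.Set String × Bool × Option String) (kv : String × String) (p : String) :
    PySem.Set.contains (pvStep st kv).1 p =
      (PySem.Set.contains st.1 p ||
        pvRules.any (fun r => PySem.Str.startswith kv.1 r.1 && (p == r.2))) := by
  simp only [pvStep, pvRules, List.foldl_cons, List.foldl_nil, List.any_cons, List.any_nil]
  split_ifs <;> simp_all [beq_eq_decide] <;> ac_rfl

-- the whole loop, found-set component, for one fixed (prefix, provider) rule
theorem pvFold_found1 (labels : List (String × String))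
    (st : PySem.Set String × Bool × Option String) (pre p : String)
    (hstep : ∀ st' kv, PySem.Set.contains (pvStep st' kv).1 p =
      (PySem.Set.contains st'.1 p || PySem.Str.startswith kv.1 pre)) :
    PySem.Set.contains (labels.foldl pvStep st).1 p =
      (PySem.Set.contains st.1 p ||
        (labels.map Prod.fst).any (fun key => PySem.Str.startswith key pre)) := by
  induction labels generalizing st with
  | nil => simp
  | cons kv rest ih =>
    simp only [List.foldl_cons, List.map_cons, List.any_cons, ih, hstep, Bool.or_assoc]

theorem pvFold_ovh (labels : List (String × String))
    (st : PySem.Set String × Bool × Option String) :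
    PySem.Set.contains (labels.foldl pvStep st).1 "ovh" =
      (PySem.Set.contains st.1 "ovh" ||
        (labels.map Prod.fst).any (fun key => PySem.Str.startswith key "k8s.ovh.net/")) := by
  refine pvFold_found1 labels st _ _ (fun st' kv => ?_)
  rw [pvStep_found]; simp [pvRules]

theorem pvFold_azure (labels : List (String × String))
    (st : PySem.Set String × Bool × Option String) :
    PySem.Set.contains (labels.foldl pvStep st).1 "azure" =
      (PySem.Set.contains st.1 "azure" ||
        (labels.map Prod.fst).any (fun key => PySem.Str.startswith key "kubernetes.azure.com/")) := by
  refine pvFold_found1 labels st _ _ (fun st' kv => ?_)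
  rw [pvStep_found]; simp [pvRules]

theorem pvFold_aws (labels : List (String × String))
    (st : PySem.Set String × Bool × Option String) :
    PySem.Set.contains (labels.foldl pvStep st).1 "aws" =
      (PySem.Set.contains st.1 "aws" ||
        (labels.map Prod.fst).any (fun key => PySem.Str.startswith key "eks.amazonaws.com/")) := by
  refine pvFold_found1 labels st _ _ (fun st' kv => ?_)
  rw [pvStep_found]; simp [pvRules]

theorem pvFold_gcp (labels : List (String × String))
    (st : PySem.Set String × Bool × Option String) :
    PySem.Set.contains (labels.foldl pvStep st).1 "gcp" =
      (PySem.Set.contains st.1 "gcp" ||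
        (labels.map Prod.fst).any (fun key => PySem.Str.startswith key "cloud.google.com/")) := by
  refine pvFold_found1 labels st _ _ (fun st' kv => ?_)
  rw [pvStep_found]; simp [pvRules]

theorem pvFold_hasIt (labels : List (String × String))
    (st : PySem.Set String × Bool × Option String) :
    (labels.foldl pvStep st).2.1 =
      (st.2.1 || (labels.map Prod.fst).contains "node.kubernetes.io/instance-type") := by
  induction labels generalizing st with
  | nil => simp
  | cons kv rest ih =>
    have hflip : ("node.kubernetes.io/instance-type" == kv.1) = (kv.1 == "node.kubernetes.io/instance-type") := BEq.comm
    simp only [List.foldl_cons, List.map_cons, List.contains_cons, ih, pvStep, hflip, Bool.or_assoc]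

theorem pvFold_region (labels : List (String × String))
    (st : PySem.Set String × Bool × Option String) :
    (labels.foldl pvStep st).2.2 =
      st.2.2.or (List.lookup "topology.kubernetes.io/region" labels) := by
  induction labels generalizing st with
  | nil => simp
  | cons kv rest ih =>
    obtain ⟨k, v⟩ := kv
    cases hr : st.2.2 <;> cases hk : "topology.kubernetes.io/region" == k <;>
      have hk2 : (k == "topology.kubernetes.io/region") = ("topology.kubernetes.io/region" == k) := BEq.comm <;>
      simp [pvStep, hr, hk, hk2, Option.or, List.lookup_cons, ih]

set_option maxHeartbeats 1000000 in
theorem pvMain (labels : List (String × String)) :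
    detect_cloud_provider_py labels = detect_cloud_provider_py_alt labels := by
  unfold detect_cloud_provider_py detect_cloud_provider_py_alt
  dsimp only
  rw [pvFold_hasIt, pvFold_region]
  simp only [Bool.false_or, Option.none_or, pvAwsRegionPrefixes, List.any_cons, List.any_nil,
    Bool.or_false, List.find?_cons, List.find?_nil]
  simp only [apply_ite (fun (l : PySem.Set String) => PySem.Set.contains l "ovh"),
    apply_ite (fun (l : PySem.Set String) => PySem.Set.contains l "azure"),
    apply_ite (fun (l : PySem.Set String) => PySem.Set.contains l "aws"),
    apply_ite (fun (l : PySem.Set String) => PySem.Set.contains l "gcp"),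
    pvContains_add, pvFold_ovh, pvFold_azure, pvFold_aws, pvFold_gcp]
  simp only [show ∀ p : String, PySem.Set.contains PySem.Set.empty p = false from fun _ => rfl,
    show ("ovh" == "aws") = false from rfl, show ("azure" == "aws") = false from rfl,
    show ("aws" == "aws") = true from rfl, show ("gcp" == "aws") = false from rfl,
    Bool.false_or, Bool.or_false, Bool.or_true, Bool.or_assoc]
  generalize ((List.map Prod.fst labels).any fun key => PySem.Str.startswith key "k8s.ovh.net/") = o
  generalize ((List.map Prod.fst labels).any fun key => PySem.Str.startswith key "kubernetes.azure.com/") = z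
  generalize ((List.map Prod.fst labels).any fun key => PySem.Str.startswith key "eks.amazonaws.com/") = e
  generalize ((List.map Prod.fst labels).any fun key => PySem.Str.startswith key "cloud.google.com/") = g
  generalize ((List.map Prod.fst labels).contains "node.kubernetes.io/instance-type") = i
  generalize (PySem.Str.startswith ((List.lookup "topology.kubernetes.io/region" labels).getD "") "us-" ||
      (PySem.Str.startswith ((List.lookup "topology.kubernetes.io/region" labels).getD "") "eu-" ||
      (PySem.Str.startswith ((List.lookup "topology.kubernetes.io/region" labels).getD "") "ap-" ||
      (PySem.Str.startswith ((List.lookup "topology.kubernetes.io/region" labels).getD "") "ca-" ||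
      PySem.Str.startswith ((List.lookup "topology.kubernetes.io/region" labels).getD "") "sa-")))) = r
  cases o <;> cases z <;> cases e <;> cases g <;> cases i <;> cases r <;> rfl

-- ===== VERDICT (by name: the statement is the Claim_ definition above) =====
theorem detect_cloud_provider_py_spec : Claim_equal_detect_cloud_provider_py := by
  intro labels _
  unfold Spec_detect_cloud_provider_py
  exact pvMain labels
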